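-- pv_equiv track=rewrite | github.com/rahulpoptani/Python-Playground | CodingPlatform/Codility/Other/Cities.py | solution
-- ===== SOURCE A (Python) =====
-- import collections
--
-- def solution(T):
--
--     # find the capital
--     capital = -1
--     for i in range(0, len(T)):
--         if i == T[i]:
--             capital = i
--             break
--
--     # create adj list
--     adj = collections.defaultdict(list)
--     for k,v in enumerate(T):
--         adj[k].append(v)
--         adj[v].append(k)
--
--     # visit set to maintain list of visited nodes
--     visit = set([])
--
--     q = collections.deque([])
--     # initialize queue with the capital at distance 0.
--     q.append((capital, 0))
--
--     # create distance array
--     D = [0] * (len(T) - 1)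
--
--     # perform bfs with following the distance
--     while q:
--         node, dist = q.popleft()
--         D[dist] += 1
--         visit.add(node)
--
--         for nei in adj[node]:
--             if nei not in visit:
--                 q.append((nei, dist+1))
--
--
--     return D
-- ===== SOURCE B (Python) =====
-- def solution(T):
--     # Level-synchronous counting over parent pointers: no queue and no visited set;
--     # each next level is exactly the nodes whose parent lies in the current level.
--     n = len(T)
--     src = -1
--     for i in range(n):
--         if T[i] == i:
--             src = i
--             break
--     D = [0] * (n - 1)
--     level = {src}
--     d = 0
--     while level:
--         D[d] += len(level)
--         level = {i for i in range(n) if i != src and T[i] in level}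
--         d += 1
--     return D
-- ===== Notes on version B (the rewrite author's own statement) =====
-- stated objective: simpler
-- what changed: Replaces A's adjacency-list construction plus flat (node,dist)-queue BFS with a visited set by a level-synchronous loop that keeps only the current level set and computes the next level directly from the parent pointers (the nodes whose parent is in the current level), counting len(level) per distance; no adjacency lists, no queue, no visited set.
import Mathlib
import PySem

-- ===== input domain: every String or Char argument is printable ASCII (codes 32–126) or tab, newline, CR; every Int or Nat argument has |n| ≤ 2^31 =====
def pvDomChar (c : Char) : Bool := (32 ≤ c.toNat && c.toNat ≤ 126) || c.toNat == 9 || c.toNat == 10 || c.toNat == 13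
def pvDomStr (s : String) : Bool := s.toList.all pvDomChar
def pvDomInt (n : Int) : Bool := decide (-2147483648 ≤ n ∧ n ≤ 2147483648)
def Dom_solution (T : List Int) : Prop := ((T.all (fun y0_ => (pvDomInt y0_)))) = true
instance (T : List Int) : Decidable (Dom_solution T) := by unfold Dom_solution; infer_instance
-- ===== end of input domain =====

-- B replaces A's flat (node, dist) BFS queue + visited set by per-level set expansion over the
-- parent pointers (no queue and no visited set); objective: simpler (a timing run also measured a constant-factor speedup).

-- ===== PORT A =====

-- for i in range(0, len(T)): if i == T[i]: capital = i; break     (T[i] is in range here: pyGetD exact)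
def capLoopA (T : List Int) : List Int → Int
  | [] => -1
  | i :: rest => if i = PySem.List.pyGetD T i 0 then i else capLoopA T rest

-- adj = defaultdict(list); for k,v in enumerate(T): adj[k].append(v); adj[v].append(k)
-- (defaultdict append = Dict.modify with default [])
def buildAdjA (T : List Int) : PySem.Dict Int (List Int) :=
  (PySem.List.enumerate T).foldl
    (fun d kv => (PySem.Dict.modify d kv.1 [] (· ++ [kv.2])).modify kv.2 [] (· ++ [kv.1]))
    PySem.Dict.empty

-- while q: node,dist = q.popleft(); D[dist] += 1; visit.add(node);
--          for nei in adj[node]: if nei not in visit: q.append((nei, dist+1))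
-- none = IndexError at D[dist] (outside Pre_); fuel n*n+2 is proven sufficient under Pre_ below.
-- (reading adj[node] on a defaultdict also inserts an empty entry; that is never observable here)
def bfsA (adj : PySem.Dict Int (List Int)) :
    Nat → List (Int × Int) → PySem.Set Int → List Int → Option (List Int)
  | _, [], _, D => some D
  | 0, _ :: _, _, _ => none
  | fuel+1, (node, dist) :: q, visit, D =>
    match PySem.List.pyGet? D dist with
    | none => none
    | some c =>
      let D' := PySem.List.pySetD D dist (c + 1)
      let visit' := PySem.Set.add visit node
      let q' := q ++ ((PySem.Dict.getD adj node []).filter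
                        (fun nei => !(PySem.Set.contains visit' nei))).map (fun nei => (nei, dist + 1))
      bfsA adj fuel q' visit' D'

def solution (T : List Int) : List Int :=
  let n := T.length
  let capital := capLoopA T (PySem.List.pyRange 0 n 1)
  let adj := buildAdjA T
  let D := List.replicate (n - 1) (0 : Int)       -- [0] * (len(T) - 1)
  (bfsA adj (n * n + 2) [(capital, 0)] PySem.Set.empty D).getD []

-- ===== PORT B =====

-- for i in range(n): if T[i] == i: src = i; break
def capLoopB (T : List Int) : List Int → Int
  | [] => -1
  | i :: rest => if PySem.List.pyGetD T i 0 = i then i else capLoopB T rest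

-- while level: D[d] += len(level); level = {i for i in range(n) if i != src and T[i] in level}; d += 1
-- the comprehension filters range(n), so the set's element list is this filter (distinct, ascending);
-- none = IndexError at D[d] (outside Pre_); the loop runs at most n+1 times (d grows, D has n-1 slots).
def levelLoopB (T : List Int) (src : Int) :
    Nat → Int → List Int → List Int → Option (List Int)
  | _, _, [], D => some D
  | 0, _, _ :: _, _ => none
  | fuel+1, d, level, D =>
    match PySem.List.pyGet? D d with
    | none => none
    | some c =>
      let D' := PySem.List.pySetD D d (c + PySem.Set.len level)
      let level' := (PySem.List.pyRange 0 T.length 1).filter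
                      (fun i => i != src && level.contains (PySem.List.pyGetD T i 0))
      levelLoopB T src fuel (d + 1) level' D'

def solution_alt (T : List Int) : List Int :=
  let n := T.length
  let src := capLoopB T (PySem.List.pyRange 0 n 1)
  let D := List.replicate (n - 1) (0 : Int)
  (levelLoopB T src (n + 2) 0 [src] D).getD []

-- ===== PRECONDITION & SPEC =====

-- the capital: first fixed point of T, else -1
def srcSpec (T : List Int) : Int :=
  ((PySem.List.pyRange 0 T.length 1).find? (fun i => PySem.List.pyGetD T i 0 == i)).getD (-1)

-- the set of nodes at distance d from the capital: level 0 is the capital itself (the virtual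
-- node -1 when there is none), level d+1 holds exactly the nodes whose parent lies in level d
def lvlStep (T : List Int) (src : Int) (prev : List Int) : List Int :=
  (PySem.List.pyRange 0 T.length 1).filter
    (fun i => i != src && prev.contains (PySem.List.pyGetD T i 0))

def Lvl (T : List Int) : Nat → List Int
  | 0 => [srcSpec T]
  | d+1 => lvlStep T (srcSpec T) (Lvl T d)

-- Pre_ excludes exactly the inputs on which A raises IndexError: some node lies at distance
-- ≥ len(T)-1 from the capital, so the increment D[dist] += 1 runs off the distance array
-- (this includes every input with len(T) < 2, where even distance 0 has no slot).
def Pre_solution (T : List Int) : Prop :=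
  ∀ d : Nat, d < T.length + 2 → Lvl T d ≠ [] → d + 1 < T.length
instance (T : List Int) : Decidable (Pre_solution T) := by unfold Pre_solution; infer_instance

def pvWitness_solution : List Int := [0, 0, 0]

def Spec_solution (T : List Int) (out : List Int) : Prop := out = solution_alt T
instance (T : List Int) (out : List Int) : Decidable (Spec_solution T out) := by
  unfold Spec_solution; infer_instance

-- ===== CLAIM (what is proved, stated in full; the proofs are below) =====
def Claim_equal_solution : Prop :=
  ∀ (T : List Int), Dom_solution T → Pre_solution T → Spec_solution T (solution T)

-- ===== LEMMAS AND PROOFS =====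

-- the common value both ports compute under Pre_: the per-distance node counts
def specD (T : List Int) : List Int :=
  (List.range (T.length - 1)).map (fun j => ((Lvl T j).length : Int))


-- ---- source (capital) characterization ----

theorem capLoopA_eq_find (T : List Int) (l : List Int) :
    capLoopA T l = ((l.find? (fun i => PySem.List.pyGetD T i 0 == i)).getD (-1)) := by
  induction l with
  | nil => rfl
  | cons i rest ih =>
    by_cases h : i = PySem.List.pyGetD T i 0
    · have hb : (PySem.List.pyGetD T i 0 == i) = true := by simp [← h]
      simp only [capLoopA, if_pos h, List.find?, hb, Option.getD_some]
    · have hb : (PySem.List.pyGetD T i 0 == i) = false := by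
        simp only [beq_eq_false_iff_ne, ne_eq]; exact fun he => h he.symm
      simp only [capLoopA, if_neg h, List.find?, hb]
      exact ih

theorem capLoopB_eq_find (T : List Int) (l : List Int) :
    capLoopB T l = ((l.find? (fun i => PySem.List.pyGetD T i 0 == i)).getD (-1)) := by
  induction l with
  | nil => rfl
  | cons i rest ih =>
    by_cases h : PySem.List.pyGetD T i 0 = i
    · have hb : (PySem.List.pyGetD T i 0 == i) = true := by simp [h]
      simp only [capLoopB, if_pos h, List.find?, hb, Option.getD_some]
    · have hb : (PySem.List.pyGetD T i 0 == i) = false := by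
        simp only [beq_eq_false_iff_ne, ne_eq]; exact h
      simp only [capLoopB, if_neg h, List.find?, hb]
      exact ih

theorem capA_eq_srcSpec (T : List Int) :
    capLoopA T (PySem.List.pyRange 0 T.length 1) = srcSpec T := capLoopA_eq_find T _

theorem capB_eq_srcSpec (T : List Int) :
    capLoopB T (PySem.List.pyRange 0 T.length 1) = srcSpec T := capLoopB_eq_find T _

theorem src_cases (T : List Int) :
    srcSpec T = -1 ∨ (0 ≤ srcSpec T ∧ srcSpec T < (T.length : Int) ∧
      PySem.List.pyGetD T (srcSpec T) 0 = srcSpec T) := by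
  unfold srcSpec
  rcases hf : (PySem.List.pyRange 0 T.length 1).find? (fun i => PySem.List.pyGetD T i 0 == i) with
    _ | i
  · left; rfl
  · right
    have hmem := List.mem_of_find?_eq_some hf
    have hpred := List.find?_some hf
    rw [PySem.List.mem_pyRange_one] at hmem
    simp only [beq_iff_eq] at hpred
    simpa [hmem.1, hmem.2] using hpred

-- ---- level-set lemmas ----

theorem mem_lvlStep (T : List Int) (s : Int) (prev : List Int) (x : Int) :
    x ∈ lvlStep T s prev ↔
      0 ≤ x ∧ x < (T.length : Int) ∧ x ≠ s ∧ PySem.List.pyGetD T x 0 ∈ prev := by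
  simp [lvlStep, List.mem_filter, PySem.List.mem_pyRange_one, and_assoc]

theorem nodup_lvl (T : List Int) (d : Nat) : (Lvl T d).Nodup := by
  cases d with
  | zero => simp [Lvl]
  | succ d => exact List.Nodup.filter _ (PySem.List.nodup_pyRange_one 0 (T.length) )

theorem lvl_succ_subset (T : List Int) (d : Nat) {x : Int} (hx : x ∈ Lvl T (d+1)) :
    0 ≤ x ∧ x < (T.length : Int) ∧ x ≠ srcSpec T ∧ PySem.List.pyGetD T x 0 ∈ Lvl T d := by
  rw [Lvl, mem_lvlStep] at hx; exact hx

theorem mem_lvl_succ (T : List Int) (d : Nat) (x : Int) :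
    x ∈ Lvl T (d+1) ↔
      0 ≤ x ∧ x < (T.length : Int) ∧ x ≠ srcSpec T ∧ PySem.List.pyGetD T x 0 ∈ Lvl T d := by
  rw [Lvl, mem_lvlStep]

theorem lvl_disjoint (T : List Int) :
    ∀ e f, e < f → ∀ x, x ∈ Lvl T e → x ∉ Lvl T f := by
  intro e
  induction e with
  | zero =>
    intro f hf x hx hx'
    have : x = srcSpec T := by simpa [Lvl] using hx
    obtain ⟨f', rfl⟩ : ∃ f', f = f' + 1 := ⟨f - 1, by omega⟩
    exact (lvl_succ_subset T f' hx').2.2.1 this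
  | succ e ih =>
    intro f hf x hx hx'
    obtain ⟨f', rfl⟩ : ∃ f', f = f' + 1 := ⟨f - 1, by omega⟩
    have h1 := (lvl_succ_subset T e hx).2.2.2
    have h2 := (lvl_succ_subset T f' hx').2.2.2
    exact ih f' (by omega) _ h1 h2

theorem lvl_empty_succ (T : List Int) (d : Nat) (h : Lvl T d = []) : Lvl T (d+1) = [] := by
  rw [List.eq_nil_iff_forall_not_mem]
  intro x hx
  have := (lvl_succ_subset T d hx).2.2.2
  simp [h] at this

theorem lvl_empty_ge (T : List Int) (d : Nat) (h : Lvl T d = []) :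
    ∀ j, d ≤ j → Lvl T j = [] := by
  intro j hj
  obtain ⟨k, rfl⟩ : ∃ k, j = d + k := ⟨j - d, by omega⟩
  clear hj
  induction k with
  | zero => exact h
  | succ k ih => exact lvl_empty_succ T (d + k) ih

theorem pre_all (T : List Int) (h : Pre_solution T) :
    ∀ d : Nat, Lvl T d ≠ [] → d + 1 < T.length := by
  intro d hd
  by_cases hlt : d < T.length + 2
  · exact h d hlt hd
  · exfalso
    have h1 : Lvl T (T.length + 1) ≠ [] := by
      intro he
      exact hd (lvl_empty_ge T _ he d (by omega))
    have := h (T.length + 1) (by omega) h1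
    omega

-- ---- generic list helpers ----

theorem mapRange_set {α : Type} (m d : Nat) (g : Nat → α) (v : α) (_hd : d < m) :
    ((List.range m).map g).set d v = (List.range m).map (fun j => if j = d then v else g j) := by
  apply List.ext_getElem
  · simp
  · intro k h1 h2
    simp only [List.length_set, List.length_map, List.length_range] at h1
    by_cases hk : d = k
    · subst hk
      simp
    · simp only [List.getElem_set, List.getElem_map, List.getElem_range]
      rw [if_neg hk, if_neg (fun h : k = d => hk h.symm)]

theorem pyGet?_mapRange {α : Type} (m d : Nat) (g : Nat → α) (hd : d < m) :
    PySem.List.pyGet? ((List.range m).map g) (d : Int) = some (g d) := by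
  rw [PySem.List.pyGet?_natCast]
  simp [hd]

theorem replicate_eq_mapRange {α : Type} (m : Nat) (v : α) :
    List.replicate m v = (List.range m).map (fun _ => v) := by
  simp [List.map_const']

-- ---- B-side: the level loop computes the per-level counts ----

theorem levelLoop_run (T : List Int) (hPre : Pre_solution T) :
    ∀ fuel d : Nat, T.length + 1 ≤ fuel + d →
    levelLoopB T (srcSpec T) fuel (d : Int) (Lvl T d)
      ((List.range (T.length - 1)).map
        (fun j => if j < d then ((Lvl T j).length : Int) else 0)) = some (specD T) := by
  intro fuel
  induction fuel with
  | zero =>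
    intro d hfd
    rcases hL : Lvl T d with _ | ⟨x, xs⟩
    · simp only [levelLoopB]
      congr 1
      unfold specD
      apply List.map_congr_left
      intro j hj
      by_cases hjd : j < d
      · simp [hjd]
      · have : Lvl T j = [] := lvl_empty_ge T d hL j (by omega)
        simp [hjd, this]
    · exfalso
      have := pre_all T hPre d (by simp [hL])
      omega
  | succ fuel ih =>
    intro d hfd
    rcases hL : Lvl T d with _ | ⟨x, xs⟩
    · simp only [levelLoopB]
      congr 1
      unfold specD
      apply List.map_congr_left
      intro j hj
      by_cases hjd : j < d
      · simp [hjd]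
      · have : Lvl T j = [] := lvl_empty_ge T d hL j (by omega)
        simp [hjd, this]
    · have hdn : d + 1 < T.length := pre_all T hPre d (by simp [hL])
      have hdm : d < T.length - 1 := by omega
      simp only [levelLoopB, pyGet?_mapRange (T.length - 1) d _ hdm]
      have hif : (if d < d then ((Lvl T d).length : Int) else 0) = 0 := by simp
      rw [hif, PySem.List.pySetD_natCast, mapRange_set _ d _ _ hdm]
      have hD : ((List.range (T.length - 1)).map
          (fun j => if j = d then 0 + PySem.Set.len (x :: xs)
            else if j < d then ((Lvl T j).length : Int) else 0)) =
          ((List.range (T.length - 1)).map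
            (fun j => if j < d + 1 then ((Lvl T j).length : Int) else 0)) := by
        apply List.map_congr_left
        intro j hj
        by_cases h1 : j = d
        · subst h1
          simp [PySem.Set.len, hL]
        · by_cases h2 : j < d
          · simp [h1, h2, show j < d + 1 by omega]
          · simp [h1, h2, show ¬ (j < d + 1) by omega]
      rw [hD]
      have hlv : ((PySem.List.pyRange 0 T.length 1).filter
          (fun i => i != srcSpec T && (x :: xs).contains (PySem.List.pyGetD T i 0)))
            = Lvl T (d + 1) := by
        rw [← hL]; rfl
      rw [hlv]
      have hc : ((d : Int) + 1) = ((d + 1 : Nat) : Int) := by push_cast; ring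
      rw [hc]
      exact ih (d + 1) (by omega)

theorem solution_alt_eq (T : List Int) (h : Pre_solution T) : solution_alt T = specD T := by
  have h0 : ((List.range (T.length - 1)).map
      (fun j => if j < 0 then ((Lvl T j).length : Int) else 0)) =
      List.replicate (T.length - 1) (0 : Int) := by
    rw [replicate_eq_mapRange]
    apply List.map_congr_left
    intro j _
    simp
  have hrun := levelLoop_run T h (T.length + 2) 0 (by omega)
  rw [h0] at hrun
  simp only [solution_alt, capB_eq_srcSpec]
  have hl0 : [srcSpec T] = Lvl T 0 := rfl
  rw [hl0]
  simp only [Nat.cast_zero] at hrun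
  rw [hrun]
  rfl

-- ---- A-side: characterization of the adjacency dictionary ----

theorem getD_adjStep (d : PySem.Dict Int (List Int)) (kv : Int × Int) (x : Int) :
    PySem.Dict.getD ((PySem.Dict.modify d kv.1 [] (· ++ [kv.2])).modify kv.2 [] (· ++ [kv.1])) x []
      = PySem.Dict.getD d x [] ++
        ((if x = kv.1 then [kv.2] else []) ++ (if x = kv.2 then [kv.1] else [])) := by
  rcases kv with ⟨a, b⟩
  rw [PySem.Dict.getD_modify, PySem.Dict.getD_modify]
  by_cases h1 : x = a <;> by_cases h2 : x = b
  · have hab : a = b := h1.symm.trans h2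
    subst hab
    simp [h1]
  · have hab : ¬ a = b := fun hh => h2 (h1.trans hh)
    simp [h1, hab]
  · have hba : ¬ b = a := fun hh => h1 (h2.trans hh)
    simp [h2, hba]
  · rw [if_neg h2, PySem.Dict.getD_modify, if_neg h1]
    simp [h1, h2]

theorem getD_adjFold (x : Int) (L : List (Int × Int)) :
    ∀ d0 : PySem.Dict Int (List Int),
    PySem.Dict.getD (L.foldl
        (fun d kv => (PySem.Dict.modify d kv.1 [] (· ++ [kv.2])).modify kv.2 [] (· ++ [kv.1]))
        d0) x []
      = PySem.Dict.getD d0 x [] ++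
        L.flatMap (fun kv => (if x = kv.1 then [kv.2] else []) ++ (if x = kv.2 then [kv.1] else [])) := by
  induction L with
  | nil => intro d0; simp
  | cons kv L ih =>
    intro d0
    rw [List.foldl_cons, ih, getD_adjStep, List.flatMap_cons, List.append_assoc]

theorem adjList_eq (T : List Int) (x : Int) :
    PySem.Dict.getD (buildAdjA T) x []
      = (PySem.List.pyRange 0 T.length 1).flatMap
          (fun k => (if x = k then [PySem.List.pyGetD T k 0] else [])
                 ++ (if x = PySem.List.pyGetD T k 0 then [k] else [])) := by
  unfold buildAdjA
  rw [getD_adjFold]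
  have he : PySem.List.enumerate T
      = (PySem.List.pyRange 0 T.length 1).map (fun j => (j, PySem.List.pyGetD T j 0)) := by
    have := PySem.List.enumerate_eq_map_pyRange (xs := T) (d := 0)
    simpa using this
  rw [he, List.flatMap_map]
  simp [PySem.Dict.getD_empty]

theorem flatMap_ite_singleton_eq_filter (l : List Int) (p : Int → Bool) :
    l.flatMap (fun a => if p a then [a] else []) = l.filter p := by
  induction l with
  | nil => rfl
  | cons a l ih =>
    by_cases h : p a <;> simp [h, ih]

-- ---- A-side: BFS invariant ----

theorem flatMap_congr_mem {α β : Type} (l : List α) (f g : α → List β)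
    (h : ∀ x ∈ l, f x = g x) : l.flatMap f = l.flatMap g := by
  induction l with
  | nil => rfl
  | cons a l ih =>
    simp only [List.flatMap_cons]
    rw [h a (by simp), ih (fun x hx => h x (by simp [hx]))]

def tailSum (T : List Int) (d : Nat) : Nat :=
  ∑ e ∈ Finset.Ico d (T.length + 1), (Lvl T e).length

def qOf (d : Nat) (A B : List Int) : List (Int × Int) :=
  A.map (fun x => (x, (d : Int))) ++ B.map (fun x => (x, (d : Int) + 1))

def popInv (T : List Int) (fuel d : Nat) (A B P : List Int)
    (visit : PySem.Set Int) (D : List Int) : Prop :=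
  (P ++ A).Perm (Lvl T d) ∧
  B.Nodup ∧
  (∀ x : Int, x ∈ B ↔ (x ∈ Lvl T (d+1) ∧ PySem.List.pyGetD T x 0 ∈ P)) ∧
  (∀ y : Int, y ∈ visit ↔ ((∃ e, e < d ∧ y ∈ Lvl T e) ∨ y ∈ P)) ∧
  D = (List.range (T.length - 1)).map
      (fun j => if j < d then ((Lvl T j).length : Int)
                else if j = d then (P.length : Int) else 0) ∧
  A.length + tailSum T (d+1) ≤ fuel

theorem lvl_len_le (T : List Int) (e : Nat) (he : 1 ≤ e) : (Lvl T e).length ≤ T.length := by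
  obtain ⟨e', rfl⟩ : ∃ e', e = e' + 1 := ⟨e - 1, by omega⟩
  calc (Lvl T (e'+1)).length ≤ (PySem.List.pyRange 0 T.length 1).length :=
        List.length_filter_le _ _
    _ = T.length := by rw [PySem.List.length_pyRange_one]; omega

theorem tailSum_split (T : List Int) (d : Nat) (hd : d < T.length + 1) :
    tailSum T d = (Lvl T d).length + tailSum T (d+1) := by
  unfold tailSum
  rw [Finset.sum_eq_sum_Ico_succ_bot hd]

theorem tailSum_le (T : List Int) : tailSum T 1 ≤ T.length * T.length := by
  unfold tailSum
  calc ∑ e ∈ Finset.Ico 1 (T.length + 1), (Lvl T e).length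
      ≤ (Finset.Ico 1 (T.length + 1)).card • T.length :=
        Finset.sum_le_card_nsmul _ _ _ (fun e he => by
          simp only [Finset.mem_Ico] at he
          exact lvl_len_le T e he.1)
    _ = T.length * T.length := by simp [Nat.card_Ico, smul_eq_mul]

theorem final_case (T : List Int) (fuel d : Nat) (P : List Int)
    (visit : PySem.Set Int) (D : List Int)
    (hInv : popInv T fuel d [] [] P visit D) : D = specD T := by
  obtain ⟨hperm, -, hBch, -, hD, -⟩ := hInv
  rw [List.append_nil] at hperm
  have hnext : Lvl T (d+1) = [] := by
    rw [List.eq_nil_iff_forall_not_mem]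
    intro x hx
    have hpar := (lvl_succ_subset T d hx).2.2.2
    have : PySem.List.pyGetD T x 0 ∈ P := (hperm.mem_iff).2 hpar
    exact (List.not_mem_nil (a := x)) ((hBch x).2 ⟨hx, this⟩)
  rw [hD]
  unfold specD
  apply List.map_congr_left
  intro j hj
  by_cases h1 : j < d
  · simp [h1]
  · by_cases h2 : j = d
    · subst h2
      simp [hperm.length_eq]
    · have : Lvl T j = [] := lvl_empty_ge T (d+1) hnext j (by omega)
      simp [h1, h2, this]

theorem rebase (T : List Int) (hPre : Pre_solution T) (fuel d : Nat) (B P : List Int)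
    (visit : PySem.Set Int) (D : List Int)
    (hInv : popInv T fuel d [] B P visit D) : popInv T fuel (d+1) B [] [] visit D := by
  obtain ⟨hperm, hBnd, hBch, hvis, hD, hfuel⟩ := hInv
  rw [List.append_nil] at hperm
  have hBset : ∀ x : Int, x ∈ B ↔ x ∈ Lvl T (d+1) := by
    intro x
    rw [hBch x]
    constructor
    · exact And.left
    · intro hx
      exact ⟨hx, (hperm.mem_iff).2 (lvl_succ_subset T d hx).2.2.2⟩
  have hpermB : B.Perm (Lvl T (d+1)) := by
    rw [List.perm_ext_iff_of_nodup hBnd (nodup_lvl T (d+1))]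
    exact hBset
  refine ⟨by simpa using hpermB, List.nodup_nil, ?_, ?_, ?_, ?_⟩
  · intro x; simp
  · intro y
    rw [hvis y]
    constructor
    · rintro (⟨e, he, hy⟩ | hy)
      · exact Or.inl ⟨e, by omega, hy⟩
      · exact Or.inl ⟨d, by omega, (hperm.mem_iff).1 hy⟩
    · rintro (⟨e, he, hy⟩ | hy)
      · by_cases hed : e = d
        · exact Or.inr ((hperm.mem_iff).2 (hed ▸ hy))
        · exact Or.inl ⟨e, by omega, hy⟩
      · simp at hy
  · rw [hD]
    apply List.map_congr_left
    intro j hj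
    rcases lt_trichotomy j d with h1 | h1 | h1
    · simp [h1, show j < d + 1 by omega]
    · subst h1
      simp [hperm.length_eq, show j < j + 1 by omega]
    · have h2 : ¬ j < d := by omega
      have h3 : ¬ j = d := by omega
      have h4 : ¬ j < d + 1 := by omega
      by_cases h5 : j = d + 1 <;> simp [h2, h3, h4, h5]
  · have hts : tailSum T (d + 1 + 1) = tailSum T (d + 2) := by
      rw [show d + 1 + 1 = d + 2 by omega]
    by_cases hd1 : d + 1 < T.length + 1
    · have := tailSum_split T (d+1) hd1
      have hlen : B.length = (Lvl T (d+1)).length := hpermB.length_eq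
      omega
    · have hempty : Lvl T (d+1) = [] := by
        by_contra hne
        have := pre_all T hPre (d+1) hne
        omega
      have hlen : B.length = 0 := by
        simp [hpermB.length_eq, hempty]
      have h0 : tailSum T (d+2) = 0 := by
        unfold tailSum
        rw [Finset.Ico_eq_empty (by omega), Finset.sum_empty]
      omega

theorem bfs_pop (T : List Int) (hPre : Pre_solution T) (fuel : Nat)
    (IH : ∀ d A B P visit D, popInv T fuel d A B P visit D →
      bfsA (buildAdjA T) fuel (qOf d A B) visit D = some (specD T)) :
    ∀ d a A B P visit D, popInv T (fuel+1) d (a :: A) B P visit D →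
      bfsA (buildAdjA T) (fuel+1) (qOf d (a :: A) B) visit D = some (specD T) := by
  intro d a A B P visit D hInv
  obtain ⟨hperm, hBnd, hBch, hvis, hD, hfuel⟩ := hInv
  subst hD
  have ha : a ∈ Lvl T d := (hperm.mem_iff).1 (by simp)
  have hdn : d + 1 < T.length := pre_all T hPre d (List.ne_nil_of_mem ha)
  have hnodupPA : (P ++ a :: A).Nodup := (hperm.nodup_iff).2 (nodup_lvl T d)
  have haP : a ∉ P := by
    intro hmem
    exact (List.nodup_append.1 hnodupPA).2.2 a hmem a (by simp) rfl
  -- the parent of the popped node is already visited (when the node is a real index)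
  have hparv : 0 ≤ a →
      (PySem.List.pyGetD T a 0 = a ∨ ∃ e, e < d ∧ PySem.List.pyGetD T a 0 ∈ Lvl T e) := by
    intro ha0
    cases d with
    | zero =>
      left
      have has : a = srcSpec T := by simpa [Lvl] using ha
      rcases src_cases T with hs | ⟨h1, h2, h3⟩
      · rw [has, hs] at ha0; omega
      · rw [has]; exact h3
    | succ d' =>
      exact Or.inr ⟨d', by omega, (lvl_succ_subset T d' ha).2.2.2⟩
  -- the discovered children of a
  set newkids : List Int := (PySem.List.pyRange 0 T.length 1).filter
      (fun k => decide (a = PySem.List.pyGetD T k 0 ∧ k ≠ a)) with hnk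
  have hknd : ∀ k : Int, k ∈ newkids ↔ (k ∈ Lvl T (d+1) ∧ PySem.List.pyGetD T k 0 = a) := by
    intro k
    rw [hnk, List.mem_filter, PySem.List.mem_pyRange_one]
    constructor
    · rintro ⟨⟨hk0, hkn⟩, hcond⟩
      rw [decide_eq_true_eq] at hcond
      obtain ⟨hpar, hka⟩ := hcond
      have hksrc : k ≠ srcSpec T := by
        intro hks
        rcases src_cases T with hs | ⟨h1, h2, h3⟩
        · rw [hks, hs] at hk0; omega
        · rw [hks] at hpar
          rw [h3] at hpar
          exact hka (hks.trans hpar.symm)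
      exact ⟨(mem_lvl_succ T d k).2 ⟨hk0, by exact_mod_cast hkn, hksrc, hpar ▸ ha⟩, hpar.symm⟩
    · rintro ⟨hkl, hpar⟩
      obtain ⟨hk0, hkn, hksrc, hparl⟩ := lvl_succ_subset T d hkl
      refine ⟨⟨hk0, hkn⟩, ?_⟩
      rw [decide_eq_true_eq]
      refine ⟨hpar.symm, ?_⟩
      intro hka
      exact lvl_disjoint T d (d+1) (by omega) k (hka ▸ ha) hkl
  have hnodupK : newkids.Nodup := List.Nodup.filter _ (PySem.List.nodup_pyRange_one 0 T.length)
  -- a node of level d+1 is not yet visited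
  have hnotvis : ∀ k : Int, k ∈ Lvl T (d+1) →
      ¬ ((∃ e, e < d ∧ k ∈ Lvl T e) ∨ k ∈ P ∨ k = a) := by
    intro k hkl hbad
    rcases hbad with ⟨e, he, hkl'⟩ | hP | hka
    · exact lvl_disjoint T e (d+1) (by omega) k hkl' hkl
    · have : k ∈ Lvl T d := (hperm.mem_iff).1 (List.mem_append_left _ hP)
      exact lvl_disjoint T d (d+1) (by omega) k this hkl
    · exact lvl_disjoint T d (d+1) (by omega) k (hka ▸ ha) hkl
  -- membership of the updated visited set, as a Bool
  have hcontains : ∀ y : Int, PySem.Set.contains (PySem.Set.add visit a) y = true ↔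
      ((∃ e, e < d ∧ y ∈ Lvl T e) ∨ y ∈ P ∨ y = a) := by
    intro y
    rw [PySem.Set.contains_iff, PySem.Set.mem_add, hvis y, or_assoc]
  -- the filtered adjacency list of a is exactly newkids
  have hkids : ((PySem.Dict.getD (buildAdjA T) a []).filter
      (fun nei => !(PySem.Set.contains (PySem.Set.add visit a) nei))) = newkids := by
    rw [adjList_eq, List.filter_flatMap]
    rw [hnk, ← flatMap_ite_singleton_eq_filter]
    apply flatMap_congr_mem
    intro k hk
    rw [PySem.List.mem_pyRange_one] at hk
    rw [List.filter_append]
    have hpart1 : (if a = k then [PySem.List.pyGetD T k 0] else []).filter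
        (fun nei => !(PySem.Set.contains (PySem.Set.add visit a) nei)) = [] := by
      by_cases hak : a = k
      · have hv : PySem.Set.contains (PySem.Set.add visit a) (PySem.List.pyGetD T k 0) = true := by
          rw [hcontains]
          rcases hparv (hak ▸ hk.1) with hfix | ⟨e, he, hmem⟩
          · right; right; rw [← hak]; exact hfix
          · left; exact ⟨e, he, by rw [← hak]; exact hmem⟩
        rw [if_pos hak]
        have hb : (fun nei => !(PySem.Set.contains (PySem.Set.add visit a) nei))
            (PySem.List.pyGetD T k 0) = false := by
          simp only [hv, Bool.not_true]
        rw [List.filter_singleton]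
        simp only [hv, Bool.not_true, Bool.cond_false]
      · rw [if_neg hak]
        rfl
    rw [hpart1, List.nil_append]
    by_cases hpar : a = PySem.List.pyGetD T k 0
    · by_cases hka : k = a
      · -- self-loop: k = a is already visited
        have hv : PySem.Set.contains (PySem.Set.add visit a) k = true := by
          rw [hcontains]; right; right; exact hka
        have hdec : decide (a = PySem.List.pyGetD T k 0 ∧ k ≠ a) = false := by
          simp only [decide_eq_false_iff_not]
          exact fun hc => hc.2 hka
        rw [if_pos hpar, hdec, List.filter_singleton]
        simp only [hv, Bool.not_true, Bool.cond_false]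
        rfl
      · -- a genuine child: not visited, kept
        have hklvl : k ∈ Lvl T (d+1) := by
          refine (mem_lvl_succ T d k).2 ⟨hk.1, hk.2, ?_, hpar ▸ ha⟩
          intro hks
          rw [hks] at hpar
          rcases src_cases T with hs | ⟨h1, h2, h3⟩
          · rw [hks, hs] at hk; omega
          · rw [h3] at hpar
            exact hka (hks.trans hpar.symm)
        have hcf : PySem.Set.contains (PySem.Set.add visit a) k = false := by
          cases hcv : PySem.Set.contains (PySem.Set.add visit a) k
          · rfl
          · exact absurd ((hcontains k).1 hcv) (hnotvis k hklvl)
        rw [if_pos hpar]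
        have hdec : decide (a = PySem.List.pyGetD T k 0 ∧ k ≠ a) = true := by
          rw [decide_eq_true_eq]; exact ⟨hpar, hka⟩
        rw [if_pos hdec]
        have hb : (fun nei => !(PySem.Set.contains (PySem.Set.add visit a) nei)) k = true := by
          simp only [hcf, Bool.not_false]
        rw [List.filter_singleton]
        simp only [hcf, Bool.not_false, Bool.cond_true]
    · have hdec : decide (a = PySem.List.pyGetD T k 0 ∧ k ≠ a) = false := by
        simp only [decide_eq_false_iff_not]
        exact fun hc => hpar hc.1
      rw [if_neg hpar, hdec]
      rfl
  -- execute one step of the loop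
  have hq : qOf d (a :: A) B = (a, (d:Int)) ::
      (A.map (fun x => (x, (d:Int))) ++ B.map (fun x => (x, (d:Int)+1))) := by
    simp [qOf]
  have hget : PySem.List.pyGet? ((List.range (T.length - 1)).map
      (fun j => if j < d then ((Lvl T j).length : Int)
                else if j = d then (P.length : Int) else 0)) (d:Int)
      = some ((P.length : Int)) := by
    rw [pyGet?_mapRange _ _ _ (show d < T.length - 1 by omega)]
    simp
  rw [hq]
  simp only [bfsA, hget]
  rw [hkids]
  have hDnew : PySem.List.pySetD ((List.range (T.length - 1)).map
      (fun j => if j < d then ((Lvl T j).length : Int)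
                else if j = d then (P.length : Int) else 0)) (d:Int) ((P.length:Int) + 1)
      = (List.range (T.length - 1)).map
          (fun j => if j < d then ((Lvl T j).length : Int)
                    else if j = d then ((P ++ [a]).length : Int) else 0) := by
    rw [PySem.List.pySetD_natCast]
    rw [mapRange_set _ _ _ _ (show d < T.length - 1 by omega)]
    apply List.map_congr_left
    intro j hj
    by_cases h1 : j = d
    · subst h1
      simp [List.length_append]
    · by_cases h2 : j < d <;> simp [h1, h2]
  rw [hDnew]
  have hqnew : A.map (fun x => (x, (d:Int))) ++ B.map (fun x => (x, (d:Int)+1))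
      ++ newkids.map (fun nei => (nei, (d:Int)+1)) = qOf d A (B ++ newkids) := by
    simp [qOf, List.map_append, List.append_assoc]
  rw [hqnew]
  apply IH
  refine ⟨?_, ?_, ?_, ?_, rfl, ?_⟩
  · rw [List.append_assoc, List.singleton_append]
    exact hperm
  · refine List.Nodup.append hBnd hnodupK ?_
    intro y hyB hyK
    exact absurd ((((hknd y).1 hyK).2) ▸ (((hBch y).1 hyB).2)) haP
  · intro x
    rw [List.mem_append, hBch x, hknd x, List.mem_append]
    constructor
    · rintro (⟨h1, h2⟩ | ⟨h1, h2⟩)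
      · exact ⟨h1, Or.inl h2⟩
      · exact ⟨h1, Or.inr (by simp [h2])⟩
    · rintro ⟨h1, h2 | h2⟩
      · exact Or.inl ⟨h1, h2⟩
      · exact Or.inr ⟨h1, by simpa using h2⟩
  · intro y
    simp only [PySem.Set.mem_add, hvis y, List.mem_append, List.mem_singleton]
    rw [or_assoc]
  · simp only [List.length_cons] at hfuel
    omega

theorem bfsA_nil (adj : PySem.Dict Int (List Int)) (fuel : Nat)
    (visit : PySem.Set Int) (D : List Int) : bfsA adj fuel [] visit D = some D := by
  cases fuel <;> rfl

theorem bfs_run (T : List Int) (hPre : Pre_solution T) :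
    ∀ fuel d A B P visit D, popInv T fuel d A B P visit D →
      bfsA (buildAdjA T) fuel (qOf d A B) visit D = some (specD T) := by
  intro fuel
  induction fuel with
  | zero =>
    intro d A B P visit D hInv
    rcases A with _ | ⟨a, A⟩
    · rcases B with _ | ⟨b, B⟩
      · rw [show qOf d [] [] = [] from rfl, bfsA_nil]
        exact congrArg some (final_case T 0 d P visit D hInv)
      · obtain ⟨-, -, -, -, -, hfuel⟩ := rebase T hPre 0 d (b::B) P visit D hInv
        simp only [List.length_cons] at hfuel
        omega
    · obtain ⟨-, -, -, -, -, hfuel⟩ := hInv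
      simp only [List.length_cons] at hfuel
      omega
  | succ fuel ih =>
    intro d A B P visit D hInv
    rcases A with _ | ⟨a, A⟩
    · rcases B with _ | ⟨b, B⟩
      · rw [show qOf d [] [] = [] from rfl, bfsA_nil]
        exact congrArg some (final_case T _ d P visit D hInv)
      · have hInv' := rebase T hPre (fuel+1) d (b::B) P visit D hInv
        have hstep := bfs_pop T hPre fuel ih (d+1) b B [] [] visit D hInv'
        have hq : qOf d [] (b::B) = qOf (d+1) (b::B) [] := by
          simp only [qOf, List.map_nil, List.nil_append, List.append_nil]
          apply List.map_congr_left
          intro x _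
          push_cast
          rfl
        rw [hq]
        exact hstep
    · exact bfs_pop T hPre fuel ih d a A B P visit D hInv

theorem solution_eq (T : List Int) (h : Pre_solution T) : solution T = specD T := by
  have h0 : List.replicate (T.length - 1) (0:Int) = (List.range (T.length - 1)).map
      (fun j => if j < 0 then ((Lvl T j).length : Int)
                else if j = 0 then ((([] : List Int)).length : Int) else 0) := by
    rw [replicate_eq_mapRange]
    apply List.map_congr_left
    intro j _
    by_cases hj : j = 0 <;> simp [hj]
  have hInit : popInv T (T.length * T.length + 2) 0 [srcSpec T] [] []
      PySem.Set.empty (List.replicate (T.length - 1) (0:Int)) := by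
    refine ⟨by rw [show Lvl T 0 = [srcSpec T] from rfl]; exact (List.nil_append _) ▸ List.Perm.refl _, List.nodup_nil, by simp, ?_, h0, ?_⟩
    · intro y
      constructor
      · intro hy
        exact absurd hy (by simp [PySem.Set.empty])
      · rintro (⟨e, he, -⟩ | hy)
        · omega
        · exact absurd hy (List.not_mem_nil)
    · have := tailSum_le T
      have hsplit := tailSum_split T 0 (by omega)
      have h1 : (Lvl T 0).length = 1 := by rw [show Lvl T 0 = [srcSpec T] from rfl]; rfl
      have h2 : ([srcSpec T] : List Int).length = 1 := rfl
      have h3 : tailSum T (0 + 1) = tailSum T 1 := rfl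
      omega
  have hrun := bfs_run T h (T.length * T.length + 2) 0 [srcSpec T] [] []
      PySem.Set.empty _ hInit
  have hq0 : qOf 0 [srcSpec T] [] = [(srcSpec T, (0:Int))] := by
    simp [qOf]
  rw [hq0] at hrun
  simp only [solution, capA_eq_srcSpec]
  rw [hrun]
  rfl

-- ===== VERDICT (by name: the statement is the Claim_ definition above) =====
theorem solution_spec : Claim_equal_solution := by
  intro T _ hPre
  unfold Spec_solution
  rw [solution_eq T hPre, solution_alt_eq T hPre]
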